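-- pv_equiv track=rewrite | github.com/Morikunmev/PythonLVLEstructurado | 2 Tuplas/Ejercicios variados/n13 estructura tupla 13.py | MayorMenor
-- ===== SOURCE A (Python) =====
-- def MayorMenor(n):
--     mayor = n[0]
--     menor = n[0]
--     for valor in n:
--         if valor[1]>mayor[1]:
--             mayor = valor
--         elif valor[1]<menor[1]:
--             menor = valor
--     return (mayor,menor)
-- ===== SOURCE B (Python) =====
-- def MayorMenor(n):
--     menor = sorted(n, key=lambda t: t[1])[0]
--     mayor = sorted(n, key=lambda t: t[1], reverse=True)[0]
--     return (mayor, menor)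
-- ===== Notes on version B (the rewrite author's own statement) =====
-- stated objective: alternative
-- what changed: Replaces A's fused single-pass if/elif scan carrying both extremes with a sort-then-pick strategy: two stable sorts by the second component (ascending and descending), taking the first element of each, whose stability reproduces A's first-extremal tie-breaking.
import Mathlib
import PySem

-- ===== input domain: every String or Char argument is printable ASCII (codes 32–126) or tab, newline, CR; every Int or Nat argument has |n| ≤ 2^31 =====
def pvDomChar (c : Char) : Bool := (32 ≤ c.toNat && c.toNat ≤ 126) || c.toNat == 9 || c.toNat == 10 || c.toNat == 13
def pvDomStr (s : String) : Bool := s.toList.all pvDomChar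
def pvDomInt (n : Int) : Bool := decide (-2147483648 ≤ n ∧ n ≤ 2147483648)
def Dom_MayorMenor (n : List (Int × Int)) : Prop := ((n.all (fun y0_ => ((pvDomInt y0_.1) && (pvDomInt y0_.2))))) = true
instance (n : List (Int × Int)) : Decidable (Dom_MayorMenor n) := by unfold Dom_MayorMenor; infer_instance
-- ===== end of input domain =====

-- B replaces A's fused single-pass if/elif scan with a sort-then-pick strategy: two
-- stable sorts by the second component, taking the first element of each (O(n log n),
-- not faster; objective: alternative algorithm).


-- ===== PORT A =====
-- A raises IndexError on [], excluded by Pre_; on the [] branch the port returns a dummy.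
def MayorMenor (n : List (Int × Int)) : (Int × Int) × (Int × Int) :=
  match n with
  | [] => ((0, 0), (0, 0))
  | h :: _ =>
    n.foldl
      (fun (st : (Int × Int) × (Int × Int)) valor =>
        if valor.2 > st.1.2 then (valor, st.2)
        else if valor.2 < st.2.2 then (st.1, valor)
        else st)
      (h, h)

-- ===== PORT B =====
-- Source B: menor = sorted(n, key=...)[0]; mayor = sorted(n, key=..., reverse=True)[0];
-- both [0] accesses raise IndexError on [], excluded by Pre_; dummy on the none branch.
def MayorMenor_alt (n : List (Int × Int)) : (Int × Int) × (Int × Int) :=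
  match PySem.List.pyGet? (PySem.List.sorted n (fun t => t.2)) 0,
        PySem.List.pyGet? (PySem.List.sorted n (fun t => t.2) true) 0 with
  | some menor, some mayor => (mayor, menor)
  | _, _ => ((0, 0), (0, 0))

-- ===== PRECONDITION & SPEC =====
-- A raises IndexError on the empty list (and B's [0] accesses raise there too).
def Pre_MayorMenor (n : List (Int × Int)) : Prop := n ≠ []
instance (n : List (Int × Int)) : Decidable (Pre_MayorMenor n) := by unfold Pre_MayorMenor; infer_instance
def pvWitness_MayorMenor : (List (Int × Int)) := [(1, 2), (3, -4), (5, 2)]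

def Spec_MayorMenor (n : List (Int × Int)) (out : (Int × Int) × (Int × Int)) : Prop := out = MayorMenor_alt n
instance (n : List (Int × Int)) (out : (Int × Int) × (Int × Int)) : Decidable (Spec_MayorMenor n out) := by unfold Spec_MayorMenor; infer_instance

-- ===== CLAIM (what is proved, stated in full; the proofs are below) =====
def Claim_equal_MayorMenor : Prop := ∀ (n : List (Int × Int)), Dom_MayorMenor n → Pre_MayorMenor n → Spec_MayorMenor n (MayorMenor n)

-- ===== LEMMAS AND PROOFS =====

-- The two running reductions A's fused loop maintains.
def maxStep (m x : Int × Int) : Int × Int := if m.2 < x.2 then x else m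
def minStep (m x : Int × Int) : Int × Int := if x.2 < m.2 then x else m

-- Invariant: as long as menor.2 ≤ mayor.2, A's fused elif-loop computes the two
-- independent running reductions.
theorem fused_eq (t : List (Int × Int)) (m mn : Int × Int) (h : mn.2 ≤ m.2) :
    List.foldl
      (fun (st : (Int × Int) × (Int × Int)) valor =>
        if valor.2 > st.1.2 then (valor, st.2)
        else if valor.2 < st.2.2 then (st.1, valor)
        else st)
      (m, mn) t = (t.foldl maxStep m, t.foldl minStep mn) := by
  induction t generalizing m mn with
  | nil => rfl
  | cons x t ih =>
    simp only [List.foldl_cons]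
    by_cases h1 : x.2 > m.2
    · rw [if_pos h1,
        show maxStep m x = x by unfold maxStep; rw [if_pos (by omega)],
        show minStep mn x = mn by unfold minStep; rw [if_neg (by omega)]]
      exact ih x mn (by omega)
    · rw [if_neg h1]
      by_cases h2 : x.2 < mn.2
      · rw [if_pos h2,
          show maxStep m x = m by unfold maxStep; rw [if_neg (by omega)],
          show minStep mn x = x by unfold minStep; rw [if_pos h2]]
        exact ih m x (by omega)
      · rw [if_neg h2,
          show maxStep m x = m by unfold maxStep; rw [if_neg (by omega)],
          show minStep mn x = mn by unfold minStep; rw [if_neg h2]]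
        exact ih m mn h

-- Inserting into a nonempty accumulator with head m yields head (if before x m then x else m).
theorem head?_insertBy (before : (Int × Int) → (Int × Int) → Bool) (x m : Int × Int)
    (ys : List (Int × Int)) :
    (PySem.List.insertBy before x (m :: ys)).head? =
      some (if before x m then x else m) := by
  simp only [PySem.List.insertBy]
  split_ifs <;> rfl

-- Head of the insertion-sort fold over a nonempty accumulator, for a generic
-- comparison 'before' and the matching binary step 'step m x = if before x m then x else m'.
theorem head?_foldl_insertBy (before : (Int × Int) → (Int × Int) → Bool)
    (step : (Int × Int) → (Int × Int) → (Int × Int))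
    (hstep : ∀ m x, step m x = if before x m then x else m)
    (t : List (Int × Int)) :
    ∀ (acc : List (Int × Int)) (m : Int × Int), acc.head? = some m →
      (t.foldl (fun a x => PySem.List.insertBy before x a) acc).head? =
        some (t.foldl step m) := by
  induction t with
  | nil => intro acc m h; simpa using h
  | cons x t ih =>
    intro acc m h
    match acc, h with
    | m :: ys, rfl =>
      simp only [List.foldl_cons]
      have hne : ∃ z zs, PySem.List.insertBy before x (m :: ys) = z :: zs := by
        simp only [PySem.List.insertBy]
        split_ifs <;> exact ⟨_, _, rfl⟩
      obtain ⟨z, zs, hz⟩ := hne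
      have hzhead : z = if before x m then x else m := by
        have := head?_insertBy before x m ys
        rw [hz] at this; exact (Option.some.injEq _ _ ▸ this)
      rw [hz, ih (z :: zs) z rfl, hstep, hzhead]

-- First element of the ascending stable sort = first minimal element.
theorem head_sorted_asc (h : Int × Int) (t : List (Int × Int)) :
    (PySem.List.sorted (h :: t) (fun p => p.2)).head? = some (t.foldl minStep h) := by
  rw [PySem.List.sorted_eq_foldl_insertBy]
  simp only [List.foldl_cons]
  have h0 : (PySem.List.insertBy (fun a b => decide (a.2 < b.2)) h ([] : List (Int × Int))).head?
      = some h := rfl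
  refine head?_foldl_insertBy _ minStep (fun m x => ?_) t _ h h0
  simp [minStep]
-- First element of the descending stable sort = first maximal element.
theorem head_sorted_desc (h : Int × Int) (t : List (Int × Int)) :
    (PySem.List.sorted (h :: t) (fun p => p.2) true).head? = some (t.foldl maxStep h) := by
  have e : PySem.List.sorted (h :: t) (fun p => p.2) true
      = List.foldl (fun acc x => PySem.List.insertBy (fun a b => decide (b.2 < a.2)) x acc) [] (h :: t) := by
    simp [PySem.List.sorted]
  rw [e]
  simp only [List.foldl_cons]
  exact head?_foldl_insertBy _ maxStep (fun m x => by simp [maxStep]) t _ h rfl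

-- pyGet? at index 0 is head?.
theorem pyGet?_zero (xs : List (Int × Int)) : PySem.List.pyGet? xs 0 = xs.head? := by
  cases xs <;> simp [PySem.List.pyGet?, PySem.List.pyIdx?]

-- ===== VERDICT (by name: the statement is the Claim_ definition above) =====
theorem MayorMenor_spec : Claim_equal_MayorMenor := by
  intro n _ hpre
  match n with
  | [] => exact absurd rfl hpre
  | h :: t =>
    show MayorMenor (h :: t) = MayorMenor_alt (h :: t)
    rw [MayorMenor_alt, pyGet?_zero, pyGet?_zero, head_sorted_asc, head_sorted_desc]
    simp only [MayorMenor, List.foldl_cons, lt_self_iff_false, gt_iff_lt, if_false]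
    rw [fused_eq t h h le_rfl]
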